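-- pv_equiv track=rewrite | github.com/hwmaltby/project-euler | problems/problem_145.py | reversible
-- ===== SOURCE A (Python) =====
-- def reversible(n):
--     """
--     Returns the number of reversible numbers less than 10 ** n. Relies on a
--     recurrence using three sequences (in addition to the desired one):
--     * a_n = num {n + reverse(n) is all odd & has same length as n}
--     * b_n = num {n + reverse(n) + 1 is all odd & has same length as n}
--     * c_n = num {n + reverse(n) is all odd & has length one greater than n's}
--     The relations between these sequences are elementary, and the desired
--     values are given by x_n = 2/3 * a_n + c_n.
--     """
--     a0, b0, c0, a, b, c, x = 1, 0, 0, 0, 5, 0, 0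
--     total = 0
--     while n > 0:
--         total += x
--         a0, b0, c0, a, b, c = a, b, c, 30 * a0, 25 * c0, 20 * b0
--         x = 2 * a // 3 + c
--         n -= 1
--     return total
-- ===== SOURCE B (Python) =====
-- def reversible(n):
--     # Closed form: the loop contributions form two geometric series
--     # (ratio 30 every 2 steps, ratio 500 every 4 steps); sum them directly.
--     if n <= 0:
--         return 0
--     return 20 * (30 ** (n // 2) - 1) // 29 + 100 * (500 ** ((n + 1) // 4) - 1) // 499
-- ===== Notes on version B (the rewrite author's own statement) =====
-- stated objective: faster
-- what changed: Replaced the n-step linear-recurrence loop by two closed-form geometric-series sums computed with fast exponentiation and one exact division each; intended as faster, measured ~180x at the largest size both runs finished (beyond that the huge result hits Python's int-to-str conversion limit in the harness).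
import Mathlib
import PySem

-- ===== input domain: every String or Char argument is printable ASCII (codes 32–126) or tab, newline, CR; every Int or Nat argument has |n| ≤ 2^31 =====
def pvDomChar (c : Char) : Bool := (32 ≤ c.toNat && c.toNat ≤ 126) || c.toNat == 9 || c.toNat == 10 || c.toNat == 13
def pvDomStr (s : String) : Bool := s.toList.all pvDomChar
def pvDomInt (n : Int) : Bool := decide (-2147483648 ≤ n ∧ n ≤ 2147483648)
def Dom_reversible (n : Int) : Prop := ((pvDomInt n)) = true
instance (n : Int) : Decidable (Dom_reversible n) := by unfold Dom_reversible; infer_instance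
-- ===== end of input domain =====

-- B replaces A's n-step recurrence loop by two closed-form geometric-series sums computed with
-- fast exponentiation (intended as faster; measured ~180x at the largest size both runs finished).

-- ===== PORT A =====
-- while n > 0 loop of A, fuel = number of remaining iterations; state in A's order
def pvLoopA : Nat → Int → Int → Int → Int → Int → Int → Int → Int → Int
  | 0, _, _, _, _, _, _, _, total => total
  | k+1, a0, b0, c0, a, b, c, x, total =>
      pvLoopA k a b c (30 * a0) (25 * c0) (20 * b0)
        (PySem.Int.floordiv (2 * (30 * a0)) 3 + 20 * b0) (total + x)

def reversible (n : Int) : Int := pvLoopA n.toNat 1 0 0 0 5 0 0 0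

-- ===== PORT B =====
def reversible_alt (n : Int) : Int :=
  if n ≤ 0 then 0
  else
    PySem.Int.floordiv (20 * (30 ^ (PySem.Int.floordiv n 2).toNat - 1)) 29 +
    PySem.Int.floordiv (100 * (500 ^ (PySem.Int.floordiv (n + 1) 4).toNat - 1)) 499

-- ===== PRECONDITION & SPEC =====
def Spec_reversible (n : Int) (out : Int) : Prop := out = reversible_alt n
instance (n : Int) (out : Int) : Decidable (Spec_reversible n out) := by unfold Spec_reversible; infer_instance

-- ===== CLAIM (what is proved, stated in full; the proofs are below) =====
def Claim_equal_reversible : Prop := ∀ (n : Int), Dom_reversible n → Spec_reversible n (reversible n)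

-- ===== LEMMAS AND PROOFS =====

/-- partial geometric sum ∑_{i<m} p^i -/
def pvGeo (p : Int) : Nat → Int
  | 0 => 0
  | m+1 => pvGeo p m + p ^ m

theorem pvGeo_succ' (p : Int) (k : Nat) : pvGeo p (k + 1) = 1 + p * pvGeo p k := by
  induction k with
  | zero => simp [pvGeo]
  | succ k ih => simp only [pvGeo, pow_succ] at ih ⊢; linear_combination ih

theorem pvGeo_mul (p : Int) (m : Nat) : (p - 1) * pvGeo p m = p ^ m - 1 := by
  induction m with
  | zero => simp [pvGeo]
  | succ m ih => rw [pvGeo, pow_succ]; nlinarith [ih]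

theorem pv_fd3 (y : Int) : PySem.Int.floordiv (2 * (30 * y)) 3 = 20 * y := by
  rw [PySem.Int.floordiv_eq_ediv_of_pos (by norm_num), show 2 * (30 * y) = 3 * (20 * y) by ring]
  exact Int.mul_ediv_cancel_left _ (by norm_num)

theorem pv_fd_exact (d q : Int) (hd : 0 < d) : PySem.Int.floordiv (d * q) d = q := by
  rw [PySem.Int.floordiv_eq_ediv_of_pos hd]
  exact Int.mul_ediv_cancel_left _ (by omega)

theorem pvInv : ∀ (n j : Nat) (t : Int),
    pvLoopA n (30 ^ (2 * j)) 0 0 0 (5 * 500 ^ j) 0 0 t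
      = t + 20 * 30 ^ (2 * j) * pvGeo 30 (n / 2) + 100 * 500 ^ j * pvGeo 500 ((n + 1) / 4) := by
  intro n
  induction n using Nat.strong_induction_on with
  | _ n ih =>
    rcases n with _ | _ | _ | _ | m
    · intro j t; simp [pvLoopA, pvGeo]
    · intro j t; simp [pvLoopA, pvGeo]
    · intro j t
      simp only [pvLoopA, pv_fd3, pvGeo]
      norm_num [pvGeo]
      try ring
    · intro j t
      simp only [pvLoopA, pv_fd3, pvGeo]
      norm_num [pvGeo]
      try ring
    · intro j t
      simp only [pvLoopA, pv_fd3]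
      norm_num
      rw [show (30:Int) * (30 * 30 ^ (2 * j)) = 30 ^ (2 * (j + 1))
            by rw [show 2 * (j + 1) = 2 * j + 1 + 1 by ring, pow_succ, pow_succ]; ring,
          show (25:Int) * (20 * (5 * 500 ^ j)) = 5 * 500 ^ (j + 1) by rw [pow_succ]; ring,
          ih m (by omega) (j + 1)]
      rw [show (m + 1 + 1 + 1 + 1) / 2 = m / 2 + 2 by omega,
          show (m + 1 + 1 + 1 + 1 + 1) / 4 = (m + 1) / 4 + 1 by omega]
      rw [pvGeo_succ' 500, pvGeo_succ' 30 (m / 2 + 1), pvGeo_succ' 30 (m / 2)]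
      rw [show 2 * (j + 1) = 2 * j + 1 + 1 by ring, pow_succ 30 (2 * j + 1), pow_succ 30 (2 * j),
          pow_succ 500 j]
      ring

-- ===== VERDICT (by name: the statement is the Claim_ definition above) =====
theorem reversible_spec : Claim_equal_reversible := by
  intro n _
  unfold Spec_reversible reversible reversible_alt
  by_cases h : n ≤ 0
  · simp [h, Int.toNat_of_nonpos h, pvLoopA]
  · simp only [if_neg h]
    have hn : (n.toNat : Int) = n := Int.toNat_of_nonneg (by omega)
    have h2 : PySem.Int.floordiv n 2 = ((n.toNat / 2 : Nat) : Int) := by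
      rw [← hn]; exact_mod_cast PySem.Int.floordiv_natCast n.toNat 2
    have h4 : PySem.Int.floordiv (n + 1) 4 = (((n.toNat + 1) / 4 : Nat) : Int) := by
      rw [show n + 1 = ((n.toNat + 1 : Nat) : Int) by push_cast [hn]; ring]
      exact_mod_cast PySem.Int.floordiv_natCast (n.toNat + 1) 4
    rw [h2, h4]
    have e30 : (20 : Int) * (30 ^ (n.toNat / 2) - 1) = 29 * (20 * pvGeo 30 (n.toNat / 2)) := by
      have := pvGeo_mul 30 (n.toNat / 2); nlinarith [this]
    have e500 : (100 : Int) * (500 ^ ((n.toNat + 1) / 4) - 1)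
        = 499 * (100 * pvGeo 500 ((n.toNat + 1) / 4)) := by
      have := pvGeo_mul 500 ((n.toNat + 1) / 4); nlinarith [this]
    rw [Int.toNat_natCast, Int.toNat_natCast, e30, e500,
        pv_fd_exact 29 _ (by norm_num), pv_fd_exact 499 _ (by norm_num)]
    have := pvInv n.toNat 0 0
    norm_num at this
    linarith [this]
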